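-- pv_equiv track=rewrite | github.com/AliAtaollahi/Artificial-Intelligence-Course-Projects | CA2-1 - Game/main.py | is_not_triangle
-- ===== SOURCE A (Python) =====
-- def is_not_triangle(nodes, i, j):
--     for p in range(len(nodes)):
--         for q in range(p+1,len(nodes)):
--             if nodes[p][1] == nodes[q][1] or nodes[p][1] == nodes[q][0] or nodes[p][0] == nodes[q][0] :
--                 points = set([nodes[p][0], nodes[p][1], nodes[q][0], nodes[q][1]])
--                 if i in points and j in points:
--                     return False
--     return True
-- ===== SOURCE B (Python) =====
-- def is_not_triangle(nodes, i, j):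
--     # One pass. For the current edge (as the later edge of a pair), the earlier
--     # partner is unconstrained if the current edge already covers both i and j,
--     # must itself touch {i,j} if the current edge covers only part of {i,j},
--     # and must cover both i and j if the current edge covers none of {i,j};
--     # so keep three indexed accumulators and scan only the relevant one.
--     seen = []   # all earlier edges
--     cands = []  # earlier edges touching i or j
--     fulls = []  # earlier edges covering both i and j
--     for e in nodes:
--         a, b = e
--         touches = a == i or b == i or a == j or b == j
--         both = (a == i or b == i) and (a == j or b == j)
--         if both:
--             if any(pb == b or pb == a or pa == a for pa, pb in seen):
--                 return False
--         elif touches: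
--             for pa, pb in cands:
--                 if (pb == b or pb == a or pa == a) and i in (pa, pb, a, b) and j in (pa, pb, a, b):
--                     return False
--         else:
--             if any(pb == b or pb == a or pa == a for pa, pb in fulls):
--                 return False
--         seen.append(e)
--         if touches:
--             cands.append(e)
--         if both:
--             fulls.append(e)
--     return True
-- ===== Notes on version B (the rewrite author's own statement) =====
-- stated objective: faster
-- what changed: Replaced A's scan over all O(E^2) edge pairs by a single pass that classifies each edge (covers both i,j / touches i or j / neither) and tests it only against the one accumulator of earlier edges that can complete a qualifying pair, so most pairs are never examined.
import Mathlib
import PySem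

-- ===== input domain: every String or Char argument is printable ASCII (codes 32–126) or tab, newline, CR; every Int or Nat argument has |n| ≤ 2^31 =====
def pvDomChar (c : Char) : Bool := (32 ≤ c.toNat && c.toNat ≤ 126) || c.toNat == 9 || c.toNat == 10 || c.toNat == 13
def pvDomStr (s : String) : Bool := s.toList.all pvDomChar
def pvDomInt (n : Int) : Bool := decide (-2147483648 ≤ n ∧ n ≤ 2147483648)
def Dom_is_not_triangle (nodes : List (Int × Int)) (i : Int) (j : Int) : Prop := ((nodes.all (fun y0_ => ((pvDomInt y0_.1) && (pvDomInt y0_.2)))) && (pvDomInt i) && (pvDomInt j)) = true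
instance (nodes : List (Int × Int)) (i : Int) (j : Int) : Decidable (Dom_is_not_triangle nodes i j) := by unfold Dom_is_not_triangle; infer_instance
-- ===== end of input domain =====

-- B replaces A's scan over all edge pairs by one pass over classified edges with
-- three accumulators (objective: faster when few edges touch i or j).

-- ===== PORT A =====
-- inner 'for q in range(p+1, len(nodes))' loop: nodes[p] is e, the elements nodes[q] (q > p) are the suffix
def aInner (i j : Int) (e : Int × Int) : List (Int × Int) → Bool
  | [] => false
  | f :: rest =>
    if e.2 == f.2 || e.2 == f.1 || e.1 == f.1 then
      let points := PySem.Set.ofList [e.1, e.2, f.1, f.2]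
      if points.contains i && points.contains j then true else aInner i j e rest
    else aInner i j e rest

-- outer 'for p in range(len(nodes))' loop: nodes[p] is the head, later elements the suffix
def aOuter (i j : Int) : List (Int × Int) → Bool
  | [] => true
  | e :: rest => if aInner i j e rest then false else aOuter i j rest

def is_not_triangle (nodes : List (Int × Int)) (i : Int) (j : Int) : Bool :=
  aOuter i j nodes

-- ===== PORT B =====
def bGo (i j : Int) (seen cands fulls : List (Int × Int)) : List (Int × Int) → Bool
  | [] => true
  | e :: rest =>
    let a := e.1
    let b := e.2
    let touches := a == i || b == i || a == j || b == j
    let both := (a == i || b == i) && (a == j || b == j)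
    let hit :=
      if both then
        seen.any (fun p => p.2 == b || p.2 == a || p.1 == a)
      else if touches then
        cands.any (fun p =>
          (p.2 == b || p.2 == a || p.1 == a) &&
          ([p.1, p.2, a, b].contains i && [p.1, p.2, a, b].contains j))
      else
        fulls.any (fun p => p.2 == b || p.2 == a || p.1 == a)
    if hit then false
    else bGo i j (seen ++ [e]) (if touches then cands ++ [e] else cands)
           (if both then fulls ++ [e] else fulls) rest

def is_not_triangle_alt (nodes : List (Int × Int)) (i : Int) (j : Int) : Bool :=
  bGo i j [] [] [] nodes

-- ===== PRECONDITION & SPEC =====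
def Spec_is_not_triangle (nodes : List (Int × Int)) (i : Int) (j : Int) (out : Bool) : Prop := out = is_not_triangle_alt nodes i j
instance (nodes : List (Int × Int)) (i : Int) (j : Int) (out : Bool) : Decidable (Spec_is_not_triangle nodes i j out) := by unfold Spec_is_not_triangle; infer_instance

-- ===== CLAIM (what is proved, stated in full; the proofs are below) =====
def Claim_equal_is_not_triangle : Prop := ∀ (nodes : List (Int × Int)) (i : Int) (j : Int), Dom_is_not_triangle nodes i j → Spec_is_not_triangle nodes i j (is_not_triangle nodes i j)

-- ===== LEMMAS AND PROOFS =====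

-- the full pair test: shared-endpoint condition and {i,j} covered by the four endpoints
def pvFull (i j : Int) (p q : Int × Int) : Bool :=
  (p.2 == q.2 || p.2 == q.1 || p.1 == q.1) &&
  ([p.1, p.2, q.1, q.2].contains i && [p.1, p.2, q.1, q.2].contains j)

def pvTouch (i j : Int) (e : Int × Int) : Bool :=
  e.1 == i || e.2 == i || e.1 == j || e.2 == j

def pvBoth (i j : Int) (e : Int × Int) : Bool :=
  (e.1 == i || e.2 == i) && (e.1 == j || e.2 == j)

-- later-edge-major enumeration of the ordered pairs: pre are the earlier edges
def pvFrom (i j : Int) (pre : List (Int × Int)) : List (Int × Int) → Bool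
  | [] => false
  | q :: rest => pre.any (fun p => pvFull i j p q) || pvFrom i j (pre ++ [q]) rest

-- earlier-edge-major enumeration (A's order)
def pvAny (i j : Int) : List (Int × Int) → Bool
  | [] => false
  | p :: rest => rest.any (fun q => pvFull i j p q) || pvAny i j rest

lemma pvSetContains (l : List Int) (x : Int) :
    (PySem.Set.ofList l).contains x = l.contains x := by
  rw [Bool.eq_iff_iff, PySem.Set.contains_iff, PySem.Set.mem_ofList, List.contains_iff_mem]

lemma pvAny_or {α : Type} (f g : α → Bool) (l : List α) :
    (l.any fun x => f x || g x) = (l.any f || l.any g) := by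
  induction l with
  | nil => simp
  | cons x xs ih =>
    simp [List.any_cons, ih]
    cases f x <;> cases g x <;> simp [Bool.or_comm]

lemma pvFrom_eq (i j : Int) (pre l : List (Int × Int)) :
    pvFrom i j pre l = ((l.any fun q => pre.any fun p => pvFull i j p q) || pvAny i j l) := by
  induction l generalizing pre with
  | nil => simp [pvFrom, pvAny]
  | cons q rest ih =>
    simp only [pvFrom, pvAny, ih (pre ++ [q]), List.any_cons]
    have h : (rest.any fun r => (pre ++ [q]).any fun p => pvFull i j p r)
        = ((rest.any fun r => pre.any fun p => pvFull i j p r) || rest.any fun r => pvFull i j q r) := by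
      have hp : ∀ r, ((pre ++ [q]).any fun p => pvFull i j p r)
          = ((pre.any fun p => pvFull i j p r) || pvFull i j q r) := by
        intro r; simp [List.any_append]
      rw [List.any_congr rfl hp]
      exact pvAny_or _ _ rest
    rw [h]
    cases pre.any fun p => pvFull i j p q <;>
      cases rest.any fun r => pre.any fun p => pvFull i j p r <;>
      cases rest.any fun r => pvFull i j q r <;>
      cases pvAny i j rest <;> simp

lemma aInner_eq (i j : Int) (e : Int × Int) (l : List (Int × Int)) :
    aInner i j e l = l.any (fun f => pvFull i j e f) := by
  induction l with
  | nil => simp [aInner]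
  | cons f rest ih =>
    simp only [aInner, pvSetContains, List.any_cons, ih, pvFull]
    split_ifs with h1 h2 <;> simp_all

lemma aOuter_eq (i j : Int) (l : List (Int × Int)) :
    aOuter i j l = !pvAny i j l := by
  induction l with
  | nil => simp [aOuter, pvAny]
  | cons e rest ih =>
    simp only [aOuter, pvAny, aInner_eq, ih]
    cases rest.any fun f => pvFull i j e f <;> simp

-- covering facts: which earlier edges can complete a qualifying pair with q
lemma pvFull_touch (i j : Int) (p q : Int × Int)
    (hb : pvBoth i j q = false)
    (h : pvFull i j p q = true) : pvTouch i j p = true := by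
  simp only [pvFull, pvTouch, pvBoth] at *
  simp only [List.contains_cons, List.contains_nil, Bool.or_false, Bool.or_eq_true,
    Bool.and_eq_true, beq_iff_eq, Bool.and_eq_false_iff, Bool.or_eq_false_iff,
    beq_eq_false_iff_ne] at *
  omega

lemma pvFull_both (i j : Int) (p q : Int × Int)
    (hq : pvTouch i j q = false)
    (h : pvFull i j p q = true) : pvBoth i j p = true := by
  simp only [pvFull, pvTouch, pvBoth] at *
  simp only [List.contains_cons, List.contains_nil, Bool.or_false, Bool.or_eq_true,
    Bool.and_eq_true, beq_iff_eq, Bool.or_eq_false_iff, beq_eq_false_iff_ne] at *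
  omega

lemma pvFull_of_both (i j : Int) (p q : Int × Int) (hq : pvBoth i j q = true) :
    pvFull i j p q = (p.2 == q.2 || p.2 == q.1 || p.1 == q.1) := by
  simp only [pvBoth, Bool.and_eq_true, Bool.or_eq_true, beq_iff_eq] at hq
  have h1 : ([p.1, p.2, q.1, q.2].contains i) = true := by
    simp only [List.contains_cons, List.contains_nil, Bool.or_false, Bool.or_eq_true, beq_iff_eq]
    omega
  have h2 : ([p.1, p.2, q.1, q.2].contains j) = true := by
    simp only [List.contains_cons, List.contains_nil, Bool.or_false, Bool.or_eq_true, beq_iff_eq]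
    omega
  simp only [pvFull, h1, h2, Bool.and_true]

lemma pvFull_of_bothp (i j : Int) (p q : Int × Int) (hp : pvBoth i j p = true) :
    pvFull i j p q = (p.2 == q.2 || p.2 == q.1 || p.1 == q.1) := by
  simp only [pvBoth, Bool.and_eq_true, Bool.or_eq_true, beq_iff_eq] at hp
  have h1 : ([p.1, p.2, q.1, q.2].contains i) = true := by
    simp only [List.contains_cons, List.contains_nil, Bool.or_false, Bool.or_eq_true, beq_iff_eq]
    omega
  have h2 : ([p.1, p.2, q.1, q.2].contains j) = true := by
    simp only [List.contains_cons, List.contains_nil, Bool.or_false, Bool.or_eq_true, beq_iff_eq]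
    omega
  simp only [pvFull, h1, h2, Bool.and_true]

lemma bGo_eq (i j : Int) (pre l : List (Int × Int)) :
    bGo i j pre (pre.filter (pvTouch i j)) (pre.filter (pvBoth i j)) l
      = !pvFrom i j pre l := by
  induction l generalizing pre with
  | nil => simp [bGo, pvFrom]
  | cons e rest ih =>
    have hhit :
        (if pvBoth i j e then
          pre.any (fun p => p.2 == e.2 || p.2 == e.1 || p.1 == e.1)
        else if pvTouch i j e then
          (pre.filter (pvTouch i j)).any (fun p =>
            (p.2 == e.2 || p.2 == e.1 || p.1 == e.1) &&
            ([p.1, p.2, e.1, e.2].contains i && [p.1, p.2, e.1, e.2].contains j))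
        else
          (pre.filter (pvBoth i j)).any (fun p => p.2 == e.2 || p.2 == e.1 || p.1 == e.1))
        = pre.any (fun p => pvFull i j p e) := by
      by_cases hb : pvBoth i j e = true
      · simp only [hb, if_pos]
        exact Eq.symm (List.any_congr rfl fun p => pvFull_of_both i j p e hb)
      · rw [if_neg (by simp [hb])]
        by_cases ht : pvTouch i j e = true
        · simp only [ht, if_pos]
          rw [List.any_filter]
          refine Eq.symm (List.any_congr rfl fun p => ?_)
          show pvFull i j p e = (pvTouch i j p && _)
          cases h' : pvTouch i j p
          · simp only [Bool.false_and]
            cases hf : pvFull i j p e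
            · rfl
            · exact absurd (pvFull_touch i j p e (by simpa using hb) hf) (by simp [h'])
          · simp only [Bool.true_and]
            rfl
        · rw [if_neg (by simp [ht])]
          rw [List.any_filter]
          refine Eq.symm (List.any_congr rfl fun p => ?_)
          show pvFull i j p e = (pvBoth i j p && _)
          cases h' : pvBoth i j p
          · simp only [Bool.false_and]
            cases hf : pvFull i j p e
            · rfl
            · exact absurd (pvFull_both i j p e (by simpa using ht) hf) (by simp [h'])
          · simp only [Bool.true_and]
            exact pvFull_of_bothp i j p e h'
    have hfe : (pre ++ [e]).filter (pvTouch i j)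
        = (if pvTouch i j e then pre.filter (pvTouch i j) ++ [e] else pre.filter (pvTouch i j)) := by
      rw [List.filter_append]; cases h : pvTouch i j e <;> simp [List.filter, h]
    have hbe : (pre ++ [e]).filter (pvBoth i j)
        = (if pvBoth i j e then pre.filter (pvBoth i j) ++ [e] else pre.filter (pvBoth i j)) := by
      rw [List.filter_append]; cases h : pvBoth i j e <;> simp [List.filter, h]
    show (if (if pvBoth i j e = true then
            pre.any fun p => p.2 == e.2 || p.2 == e.1 || p.1 == e.1
          else if pvTouch i j e = true then
            (List.filter (pvTouch i j) pre).any fun p =>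
              (p.2 == e.2 || p.2 == e.1 || p.1 == e.1) &&
                ([p.1, p.2, e.1, e.2].contains i && [p.1, p.2, e.1, e.2].contains j)
          else (List.filter (pvBoth i j) pre).any fun p => p.2 == e.2 || p.2 == e.1 || p.1 == e.1) = true
        then false
        else bGo i j (pre ++ [e])
          (if pvTouch i j e = true then List.filter (pvTouch i j) pre ++ [e] else List.filter (pvTouch i j) pre)
          (if pvBoth i j e = true then List.filter (pvBoth i j) pre ++ [e] else List.filter (pvBoth i j) pre)
          rest) = !pvFrom i j pre (e :: rest)
    rw [hhit]
    simp only [pvFrom]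
    cases hany : pre.any (fun p => pvFull i j p e)
    · rw [if_neg (by decide), Bool.false_or, ← hfe, ← hbe]
      exact ih (pre ++ [e])
    · simp

-- ===== VERDICT (by name: the statement is the Claim_ definition above) =====
theorem is_not_triangle_spec : Claim_equal_is_not_triangle := by
  intro nodes i j _
  unfold Spec_is_not_triangle
  show aOuter i j nodes = bGo i j [] [] [] nodes
  have hb := bGo_eq i j [] nodes
  simp only [List.filter_nil] at hb
  rw [hb, aOuter_eq, pvFrom_eq]
  simp
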